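-- pv_equiv track=rewrite | github.com/HonzaHejda/SignalViewer | main.py | generate_plot_titles
-- ===== SOURCE A (Python) =====
-- def generate_plot_titles(num_emg_files, num_imu_files):
--     signal_list = []
--
--     for i in range(1, num_emg_files + 1):
--         signal_list.append(f"Signal {i} - EMG")
--         if num_imu_files > 0:
--             signal_list.append(f"Signal {i} - Acceleration")
--             signal_list.append(f"Signal {i} - Orientation")
--
--     return signal_list
-- ===== SOURCE B (Python) =====
-- def generate_plot_titles(num_emg_files, num_imu_files):
--     indices = range(1, num_emg_files + 1)
--     emg = [f"Signal {i} - EMG" for i in indices]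
--     if num_imu_files <= 0:
--         return emg
--     accel = [f"Signal {i} - Acceleration" for i in indices]
--     orient = [f"Signal {i} - Orientation" for i in indices]
--     return [title for row in zip(emg, accel, orient) for title in row]
-- ===== Notes on version B (the rewrite author's own statement) =====
-- stated objective: alternative
-- what changed: Builds the three title columns (EMG, Acceleration, Orientation) as separate whole passes over the index range and then interleaves them with zip, instead of emitting one-to-three titles per index inside a single loop with conditional appends.
import Mathlib
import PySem

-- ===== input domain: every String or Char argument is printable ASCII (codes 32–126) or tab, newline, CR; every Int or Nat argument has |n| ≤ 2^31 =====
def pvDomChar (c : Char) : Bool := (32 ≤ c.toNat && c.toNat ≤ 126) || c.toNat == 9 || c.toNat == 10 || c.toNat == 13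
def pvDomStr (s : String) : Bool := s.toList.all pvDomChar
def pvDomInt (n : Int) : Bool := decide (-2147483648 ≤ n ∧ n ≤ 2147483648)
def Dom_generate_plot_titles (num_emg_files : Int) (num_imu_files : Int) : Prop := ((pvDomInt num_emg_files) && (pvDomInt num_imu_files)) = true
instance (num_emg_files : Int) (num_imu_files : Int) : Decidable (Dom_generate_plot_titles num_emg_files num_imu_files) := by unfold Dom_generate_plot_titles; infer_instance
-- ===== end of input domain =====

-- B builds the three title columns as separate whole passes and interleaves them with
-- zip, instead of conditionally appending per index in one loop; objective: alternative.

-- ===== PORT A =====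
def generate_plot_titles (num_emg_files : Int) (num_imu_files : Int) : List String :=
  (PySem.List.pyRange 1 (num_emg_files + 1) 1).foldl
    (fun signal_list i =>
      let signal_list := signal_list ++ ["Signal " ++ PySem.Int.toStr i ++ " - EMG"]
      if num_imu_files > 0 then
        (signal_list ++ ["Signal " ++ PySem.Int.toStr i ++ " - Acceleration"])
          ++ ["Signal " ++ PySem.Int.toStr i ++ " - Orientation"]
      else signal_list) []

-- ===== PORT B =====
def generate_plot_titles_alt (num_emg_files : Int) (num_imu_files : Int) : List String :=
  let indices := PySem.List.pyRange 1 (num_emg_files + 1) 1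
  let emg := indices.map (fun i => "Signal " ++ PySem.Int.toStr i ++ " - EMG")
  if num_imu_files ≤ 0 then emg
  else
    let accel := indices.map (fun i => "Signal " ++ PySem.Int.toStr i ++ " - Acceleration")
    let orient := indices.map (fun i => "Signal " ++ PySem.Int.toStr i ++ " - Orientation")
    (emg.zip (accel.zip orient)).flatMap (fun row => [row.1, row.2.1, row.2.2])

-- ===== PRECONDITION & SPEC =====
def Spec_generate_plot_titles (num_emg_files : Int) (num_imu_files : Int) (out : List String) : Prop := out = generate_plot_titles_alt num_emg_files num_imu_files
instance (num_emg_files : Int) (num_imu_files : Int) (out : List String) : Decidable (Spec_generate_plot_titles num_emg_files num_imu_files out) := by unfold Spec_generate_plot_titles; infer_instance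

-- ===== CLAIM (what is proved, stated in full; the proofs are below) =====
def Claim_equal_generate_plot_titles : Prop := ∀ (num_emg_files : Int) (num_imu_files : Int), Dom_generate_plot_titles num_emg_files num_imu_files → Spec_generate_plot_titles num_emg_files num_imu_files (generate_plot_titles num_emg_files num_imu_files)

-- ===== LEMMAS AND PROOFS =====
-- One loop iteration of A appends the index's one- or three-title block.
theorem gpt_step_eq (imu : Int) (i : Int) (acc : List String) :
    (let acc' := acc ++ ["Signal " ++ PySem.Int.toStr i ++ " - EMG"]
     if imu > 0 then
       (acc' ++ ["Signal " ++ PySem.Int.toStr i ++ " - Acceleration"])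
         ++ ["Signal " ++ PySem.Int.toStr i ++ " - Orientation"]
     else acc')
    = acc ++ (if imu > 0 then
        ["Signal " ++ PySem.Int.toStr i ++ " - EMG",
         "Signal " ++ PySem.Int.toStr i ++ " - Acceleration",
         "Signal " ++ PySem.Int.toStr i ++ " - Orientation"]
      else ["Signal " ++ PySem.Int.toStr i ++ " - EMG"]) := by
  by_cases h : imu > 0 <;> simp [h, List.append_assoc]

-- A's loop, started from any accumulator, appends per index the block of one or three titles.
theorem gpt_foldl_flatMap (imu : Int) (l : List Int) (acc : List String) :
    l.foldl (fun signal_list i =>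
      let signal_list := signal_list ++ ["Signal " ++ PySem.Int.toStr i ++ " - EMG"]
      if imu > 0 then
        (signal_list ++ ["Signal " ++ PySem.Int.toStr i ++ " - Acceleration"])
          ++ ["Signal " ++ PySem.Int.toStr i ++ " - Orientation"]
      else signal_list) acc
    = acc ++ l.flatMap (fun i =>
        if imu > 0 then
          ["Signal " ++ PySem.Int.toStr i ++ " - EMG",
           "Signal " ++ PySem.Int.toStr i ++ " - Acceleration",
           "Signal " ++ PySem.Int.toStr i ++ " - Orientation"]
        else ["Signal " ++ PySem.Int.toStr i ++ " - EMG"]) := by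
  induction l generalizing acc with
  | nil => simp
  | cons x xs ih =>
    rw [List.foldl_cons, List.flatMap_cons, gpt_step_eq imu x acc, ih, List.append_assoc]

-- One-title blocks flatten to a plain map.
theorem gpt_flatMap_single {a : Type} (f : a -> String) (l : List a) :
    l.flatMap (fun i => [f i]) = l.map f := by
  induction l with
  | nil => rfl
  | cons x xs ih => simp [ih]

-- Zipping three mapped columns over the same list and flattening rows is the per-index flatMap.
theorem gpt_zip_cols {α : Type} (f g h : α → String) (l : List α) :
    (((l.map f).zip ((l.map g).zip (l.map h))).flatMap (fun row => [row.1, row.2.1, row.2.2]))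
    = l.flatMap (fun i => [f i, g i, h i]) := by
  induction l with
  | nil => rfl
  | cons x xs ih => simp [ih]

-- ===== VERDICT (by name: the statement is the Claim_ definition above) =====
theorem generate_plot_titles_spec : Claim_equal_generate_plot_titles := by
  intro e imu _
  unfold Spec_generate_plot_titles generate_plot_titles generate_plot_titles_alt
  rw [gpt_foldl_flatMap]
  by_cases h : imu ≤ 0
  · have h' : ¬ imu > 0 := by omega
    simp only [h, h', if_true, if_false, List.nil_append, gpt_flatMap_single]
  · have h' : imu > 0 := by omega
    simp only [h, if_false, gpt_zip_cols, h', if_true, List.nil_append]
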